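-- pv_equiv track=rewrite | github.com/cstrynar/TuringComplete-NimmyOS | ComponentTesting/Utility/MathUtility.py | SHL
-- ===== SOURCE A (Python) =====
-- def IntToBits(num: int, numBits: int = 64) -> list:
--     l = [0] * numBits
--
--     for i in range(1, numBits+1):
--         l[-i] = 1 if num % (2 ** i) != 0 else 0
--         num -= num % (2 ** i)
--
--         if (num == 0):
--             break
--
--     return l
--
-- def SIntToBits(num: int, numBits: int = 64) -> list:
--     # check that number falls within the bounds of the encoding
--     if num < -2 ** (numBits-1) or num > 2 ** (numBits-1) - 1:
--         raise ValueError(f'{num} cannot be encoded as a signed {numBits}-bit integer.')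
--
--     return IntToBits(num, numBits)
--
-- def BitsToSInt(bits: list) -> int:
--     numBits = len(bits)
--     num = 0
--
--     if bits[0] == 1:
--         num -= 2 ** (numBits-1)
--
--     for i in range(1, numBits):
--         if bits[-i] == 1:
--             num += 2 ** (i-1)
--
--     return num
--
-- def SHL(input1: int, input2: int) -> int:
--     if abs(input2) >= 64:
--         return 0
--
--     l1 = SIntToBits(input1)
--     ans = [0] * 64
--
--     for i in range(64):
--         if i - input2 >= 0 and i - input2 <= 63:
--             ans[i-input2] = l1[i]
--
--     return BitsToSInt(ans)
-- ===== SOURCE B (Python) =====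
-- def SHL(input1: int, input2: int) -> int:
--     if abs(input2) >= 64:
--         return 0
--     if input1 < -2**63 or input1 > 2**63 - 1:
--         raise ValueError(f'{input1} cannot be encoded as a signed 64-bit integer.')
--     u = input1 & (2**64 - 1)
--     if input2 >= 0:
--         r = (u << input2) & (2**64 - 1)
--     else:
--         r = u >> (-input2)
--     return r - 2**64 if r >= 2**63 else r
-- ===== Notes on version B (the rewrite author's own statement) =====
-- stated objective: simpler
-- what changed: Replaced the three bit-array helpers (building a 64-entry list bit by bit, shifting it index-wise, and summing it back) with direct native-integer arithmetic: mask to the unsigned 64-bit pattern, multiply/shift by a power of two, mask again, and reinterpret as signed.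
import Mathlib
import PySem

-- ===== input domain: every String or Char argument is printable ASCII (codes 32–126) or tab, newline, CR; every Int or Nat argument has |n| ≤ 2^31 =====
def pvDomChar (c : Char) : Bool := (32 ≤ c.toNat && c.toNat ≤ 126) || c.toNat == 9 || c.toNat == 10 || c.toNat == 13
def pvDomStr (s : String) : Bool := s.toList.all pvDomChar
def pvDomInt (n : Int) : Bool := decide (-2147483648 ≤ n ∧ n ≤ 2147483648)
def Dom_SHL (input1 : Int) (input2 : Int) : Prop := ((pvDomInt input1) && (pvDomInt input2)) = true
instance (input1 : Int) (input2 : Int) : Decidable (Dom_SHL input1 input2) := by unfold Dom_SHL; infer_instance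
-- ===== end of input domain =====

-- B replaces A's bit-array helpers with direct unsigned-pattern integer arithmetic (mask, multiply/divide by a power of two, reinterpret as signed).

-- ===== PORT A =====
-- loop of IntToBits: for i in range(1, numBits+1): l[-i] = 1 if num % 2**i != 0 else 0; num -= num % 2**i; break when num == 0
-- (Lean's % on Int is emod, which matches Python's % for the positive modulus 2**i)
def intToBitsLoop (num : Int) (numBits : Nat) (i : Nat) (l : List Int) : List Int :=
  if _h : i ≤ numBits then
    let bit : Int := if num % (2:Int)^i ≠ 0 then 1 else 0
    let l' := l.set (numBits - i) bit   -- l[-i] with len(l) = numBits and 1 ≤ i ≤ numBits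
    let num' := num - num % (2:Int)^i
    if num' = 0 then l' else intToBitsLoop num' numBits (i+1) l'
  else l
termination_by numBits + 1 - i

def IntToBits (num : Int) (numBits : Nat) : List Int :=
  intToBitsLoop num numBits 1 (List.replicate numBits 0)

-- none = the ValueError branch (unreachable inside Dom_SHL)
def SIntToBits (num : Int) (numBits : Nat) : Option (List Int) :=
  if num < -((2:Int)^(numBits-1)) ∨ num > (2:Int)^(numBits-1) - 1 then none
  else some (IntToBits num numBits)

def BitsToSInt (bits : List Int) : Int :=
  let numBits := bits.length
  -- bits[0]: exact for the nonempty lists this helper receives (always length 64 here)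
  let num : Int := if bits.getD 0 0 = 1 then -((2:Int)^(numBits-1)) else 0
  -- for i in range(1, numBits): if bits[-i] == 1: num += 2**(i-1)
  (List.range' 1 (numBits - 1)).foldl
    (fun num i => if bits.getD (numBits - i) 0 = 1 then num + (2:Int)^(i-1) else num) num

def SHL (input1 : Int) (input2 : Int) : Int :=
  if input2.natAbs ≥ 64 then 0
  else
    match SIntToBits input1 64 with
    | none => 0   -- Python raises ValueError here; unreachable inside Dom_SHL
    | some l1 =>
      -- for i in range(64): if 0 <= i - input2 <= 63: ans[i - input2] = l1[i]
      let ans := (List.range 64).foldl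
        (fun (ans : List Int) (i : Nat) =>
          if 0 ≤ (i:Int) - input2 ∧ (i:Int) - input2 ≤ 63 then
            ans.set ((i:Int) - input2).toNat (l1.getD i 0)
          else ans)
        (List.replicate 64 (0:Int))
      BitsToSInt ans

-- ===== PORT B =====
def SHL_alt (input1 : Int) (input2 : Int) : Int :=
  if input2.natAbs ≥ 64 then 0
  else if input1 < -((2:Int)^63) ∨ input1 > (2:Int)^63 - 1 then 0  -- B raises ValueError here; unreachable inside Dom_SHL
  else
    let u := input1 % (2:Int)^64          -- input1 & (2**64 - 1)
    let r := if input2 ≥ 0 then (u * (2:Int)^input2.toNat) % (2:Int)^64   -- (u << input2) & (2**64 - 1)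
             else u / (2:Int)^(-input2).toNat                             -- u >> (-input2): logical, u ≥ 0
    if r ≥ (2:Int)^63 then r - (2:Int)^64 else r

-- ===== PRECONDITION & SPEC =====
def Spec_SHL (input1 : Int) (input2 : Int) (out : Int) : Prop := out = SHL_alt input1 input2
instance (input1 : Int) (input2 : Int) (out : Int) : Decidable (Spec_SHL input1 input2 out) := by unfold Spec_SHL; infer_instance

-- ===== CLAIM (what is proved, stated in full; the proofs are below) =====
def Claim_equal_SHL : Prop := ∀ (input1 : Int) (input2 : Int), Dom_SHL input1 input2 → Spec_SHL input1 input2 (SHL input1 input2)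

-- ===== LEMMAS AND PROOFS =====

-- bit k of m, read off the two's-complement remainders A manipulates
def bitI (m : Int) (k : Nat) : Int := (m % (2:Int)^(k+1)) / (2:Int)^k

-- the list IntToBits builds: index j holds bit (63 - j)
def Tlist (m : Int) : List Int := List.ofFn (fun j : Fin 64 => bitI m (63 - (j:Nat)))

lemma bitI_zero_or_one (m : Int) (k : Nat) : bitI m k = 0 ∨ bitI m k = 1 := by
  unfold bitI
  have hk : (0:Int) < 2^k := by positivity
  have h1 : (0:Int) ≤ m % 2^(k+1) := Int.emod_nonneg m (by positivity)
  have h2 : m % (2:Int)^(k+1) < 2^(k+1) := Int.emod_lt_of_pos m (by positivity)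
  have h3 : (0:Int) ≤ m % 2^(k+1) / 2^k := Int.ediv_nonneg h1 (le_of_lt hk)
  have h4 : m % (2:Int)^(k+1) / 2^k < 2 := by
    rw [Int.ediv_lt_iff_lt_mul hk]
    calc m % (2:Int)^(k+1) < 2^(k+1) := h2
    _ = 2 * 2^k := by ring
  omega

lemma step_identity (m : Int) (k : Nat) :
    (2:Int)^k * bitI m k = m % (2:Int)^(k+1) - m % (2:Int)^k := by
  unfold bitI
  have hdvd : ((2:Int)^k) ∣ (2:Int)^(k+1) := pow_dvd_pow 2 (Nat.le_succ k)
  have h1 : m % (2:Int)^k = (m % (2:Int)^(k+1)) % (2:Int)^k := (Int.emod_emod_of_dvd m hdvd).symm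
  rw [h1]
  have := Int.mul_ediv_add_emod (m % (2:Int)^(k+1)) ((2:Int)^k)
  omega

lemma emod_sub_emod (m : Int) (k : Nat) :
    (m - m % (2:Int)^k) % (2:Int)^(k+1) = m % (2:Int)^(k+1) - m % (2:Int)^k := by
  have hs := step_identity m k
  have hb := bitI_zero_or_one m k
  have hk1 : (0:Int) < 2^(k+1) := by positivity
  have hkk : (2:Int)^k < 2^(k+1) := by
    have : (2:Int)^(k+1) = 2 * 2^k := by ring
    have hk : (0:Int) < 2^k := by positivity
    omega
  have hgoal : m % (2:Int)^(k+1) - m % (2:Int)^k = (2:Int)^k * bitI m k := hs.symm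
  have hlt : m % (2:Int)^(k+1) - m % (2:Int)^k < 2^(k+1) := by
    rcases hb with h | h <;> rw [hgoal, h] <;> simp <;> omega
    
  have hge : 0 ≤ m % (2:Int)^(k+1) - m % (2:Int)^k := by
    have hk : (0:Int) < 2^k := by positivity
    rcases hb with h | h <;> rw [hgoal, h] <;> omega
  have hmk1 : m % (2:Int)^k = (m % (2:Int)^k) % (2:Int)^(k+1) := by
    have h1 : (0:Int) ≤ m % 2^k := Int.emod_nonneg m (by positivity)
    have h2 : m % (2:Int)^k < 2^k := Int.emod_lt_of_pos m (by positivity)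
    rw [Int.emod_eq_of_lt h1 (by omega)]
  have : (m - m % (2:Int)^k) % (2:Int)^(k+1) = (m % (2:Int)^(k+1) - m % (2:Int)^k) % 2^(k+1) := by
    conv_lhs => rw [Int.sub_emod, ← hmk1]
  rw [this, Int.emod_eq_of_lt hge hlt]

lemma bitI_emod (m : Int) (k n : Nat) (h : k + 1 ≤ n) : bitI (m % (2:Int)^n) k = bitI m k := by
  unfold bitI
  rw [Int.emod_emod_of_dvd m (pow_dvd_pow 2 h)]

lemma bitI_eq_zero_of_lt (m : Int) (k : Nat) (h0 : 0 ≤ m) (h1 : m < (2:Int)^k) : bitI m k = 0 := by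
  unfold bitI
  have hkk : (2:Int)^k < 2^(k+1) := by
    have hk : (0:Int) < 2^k := by positivity
    have : (2:Int)^(k+1) = 2 * 2^k := by ring
    omega
  rw [Int.emod_eq_of_lt h0 (by omega)]
  exact Int.ediv_eq_zero_of_lt h0 h1

lemma sum_bits (m : Int) (n : Nat) :
    ((List.range n).map (fun k => bitI m k * (2:Int)^k)).sum = m % (2:Int)^n := by
  induction n with
  | zero => simp
  | succ n ih =>
    rw [List.range_succ, List.map_append, List.sum_append]
    simp only [List.map_cons, List.map_nil, List.sum_cons, List.sum_nil, add_zero, ih]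
    have h1 := step_identity m n
    have h2 : bitI m n * (2:Int)^n = (2:Int)^n * bitI m n := mul_comm _ _
    omega

lemma bitI_natCast (a k : Nat) : bitI (a : Int) k = if a.testBit k then 1 else 0 := by
  unfold bitI
  rw [show ((2:Int)^(k+1)) = ((2^(k+1) : Nat) : Int) by push_cast; ring,
      show ((2:Int)^k) = ((2^k : Nat) : Int) by push_cast; ring,
      ← Int.natCast_mod, ← Int.natCast_div]
  have hpos : 0 < 2^k := Nat.two_pow_pos k
  have h : (a % 2^(k+1)) / 2^k = a / 2^k % 2 := by
    rw [Nat.mod_pow_succ, Nat.mul_comm, Nat.add_mul_div_right _ _ hpos,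
        Nat.div_eq_of_lt (Nat.mod_lt a hpos), Nat.zero_add]
  rw [h, Nat.testBit_eq_decide_div_mod_eq]
  rcases Nat.mod_two_eq_zero_or_one (a / 2^k) with h2 | h2 <;> simp [h2]

lemma bitI_of_div (u : Int) (hu0 : 0 ≤ u) (k p : Nat) :
    bitI (u / (2:Int)^k) p = bitI u (p + k) := by
  obtain ⟨a, rfl⟩ := Int.eq_ofNat_of_zero_le hu0
  rw [show ((2:Int)^k) = ((2^k : Nat) : Int) by push_cast; ring, ← Int.natCast_div,
      bitI_natCast, bitI_natCast, Nat.testBit_div_two_pow]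

lemma bitI_of_mul_emod (u : Int) (hu0 : 0 ≤ u) (s p : Nat) (hp : p < 64) :
    bitI ((u * (2:Int)^s) % (2:Int)^64) p = if s ≤ p then bitI u (p - s) else 0 := by
  obtain ⟨a, rfl⟩ := Int.eq_ofNat_of_zero_le hu0
  rw [show ((2:Int)^s) = ((2^s : Nat) : Int) by push_cast; ring,
      show ((2:Int)^64) = ((2^64 : Nat) : Int) by norm_num,
      ← Int.natCast_mul, ← Int.natCast_mod, bitI_natCast, bitI_natCast,
      ← Nat.shiftLeft_eq, Nat.testBit_mod_two_pow, Nat.testBit_shiftLeft]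
  simp only [hp, decide_true, Bool.true_and]
  by_cases hsp : s ≤ p <;> simp [hsp]

lemma loop_inv (d : Nat) : ∀ (i : Nat) (num0 : Int) (l : List Int),
    i + d = 65 → 1 ≤ i → l.length = 64 →
    (∀ j, j < 64 → l.getD j 0 = if 65 - i ≤ j then bitI num0 (63 - j) else 0) →
    intToBitsLoop (num0 - num0 % (2:Int)^(i-1)) 64 i l = Tlist num0 := by
  induction d with
  | zero =>
    intro i num0 l hd _ hlen hinv
    rw [intToBitsLoop, dif_neg (by omega)]
    apply List.ext_getElem (by simp only [Tlist, List.length_ofFn, hlen])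
    intro j h1 h2
    have hj : j < 64 := by omega
    have := hinv j hj
    rw [List.getD_eq_getElem l 0 (by omega)] at this
    simp only [show 65 - i ≤ j from by omega, if_pos] at this
    simp only [Tlist, List.getElem_ofFn] at h2 ⊢
    rw [this]
  | succ d ih =>
    intro i num0 l hd hi1 hlen hinv
    have hi64 : i ≤ 64 := by omega
    have hisub : i - 1 + 1 = i := by omega
    rw [intToBitsLoop, dif_pos hi64]
    have hkey : (num0 - num0 % (2:Int)^(i-1)) % (2:Int)^i = (2:Int)^(i-1) * bitI num0 (i-1) := by
      have h1 := emod_sub_emod num0 (i-1)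
      have h2 := step_identity num0 (i-1)
      rw [hisub] at h1
      rw [hisub] at h2
      omega
    have hbit : (if (num0 - num0 % (2:Int)^(i-1)) % (2:Int)^i ≠ 0 then (1:Int) else 0)
        = bitI num0 (i-1) := by
      have hp : (0:Int) < 2^(i-1) := by positivity
      rcases bitI_zero_or_one num0 (i-1) with h | h <;> rw [hkey, h] <;> simp
    have hnum' : num0 - num0 % (2:Int)^(i-1) - (num0 - num0 % (2:Int)^(i-1)) % (2:Int)^i
        = num0 - num0 % (2:Int)^i := by
      have h2 := step_identity num0 (i-1)
      rw [hisub] at h2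
      omega
    have hlen' : (l.set (64-i) (bitI num0 (i-1))).length = 64 := by simp [hlen]
    have hinv' : ∀ j, j < 64 → (l.set (64-i) (bitI num0 (i-1))).getD j 0
        = if 64 - i ≤ j then bitI num0 (63 - j) else 0 := by
      intro j hj
      rw [List.getD_eq_getElem _ 0 (by omega)]
      rw [List.getElem_set]
      have := hinv j hj
      rw [List.getD_eq_getElem l 0 (by omega)] at this
      rw [this]
      split_ifs with ha hb hb hc hc <;>
        first
        | rfl
        | omega
        | (subst ha; rw [show 63 - (64 - i) = i - 1 from by omega])
    simp only [hbit]
    split_ifs with hz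
    · -- break: num == 0 after this step, i.e. num0 = num0 % 2^i ∈ [0, 2^i)
      have hz' : num0 = num0 % (2:Int)^i := by
        have := hnum' ▸ hz
        omega
      have h0 : (0:Int) ≤ num0 := hz' ▸ Int.emod_nonneg num0 (by positivity)
      have hlt : num0 < (2:Int)^i := hz' ▸ Int.emod_lt_of_pos num0 (by positivity)
      apply List.ext_getElem (by simp only [Tlist, List.length_ofFn, hlen'])
      intro j h1 h2
      have hj : j < 64 := by omega
      have := hinv' j hj
      rw [List.getD_eq_getElem _ 0 (by omega)] at this
      rw [this]
      simp only [Tlist, List.getElem_ofFn]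
      split_ifs with hc
      · rfl
      · -- j < 64 - i, so 63 - j ≥ i and the untouched 0 is the correct bit
        have hle : (2:Int)^i ≤ (2:Int)^(63-j) := by
          apply pow_le_pow_right₀ (by norm_num)
          omega
        exact (bitI_eq_zero_of_lt num0 (63-j) h0 (lt_of_lt_of_le hlt hle)).symm
    · rw [hnum']
      have : num0 - num0 % (2:Int)^i = num0 - num0 % (2:Int)^((i+1)-1) := by norm_num
      rw [this]
      exact ih (i+1) num0 _ (by omega) (by omega) hlen' (by
        intro j hj
        rw [show 65 - (i+1) = 64 - i from by omega]
        exact hinv' j hj)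

lemma intToBits_eq (num : Int) : IntToBits num 64 = Tlist num := by
  unfold IntToBits
  have h := loop_inv 64 1 num (List.replicate 64 0) (by omega) (by omega) (by simp)
    (by intro j hj; rw [List.getD_eq_getElem _ 0 (by simp; omega), List.getElem_replicate,
          if_neg (by omega)])
  simpa using h

lemma Tlist_getD (m : Int) (j : Nat) (hj : j < 64) : (Tlist m).getD j 0 = bitI m (63 - j) := by
  rw [List.getD_eq_getElem _ 0 (by simp only [Tlist, List.length_ofFn]; omega)]
  simp only [Tlist, List.getElem_ofFn]

lemma bitsToSInt_Tlist (m : Int) :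
    BitsToSInt (Tlist m) =
      (if m % (2:Int)^64 ≥ (2:Int)^63 then m % (2:Int)^64 - (2:Int)^64 else m % (2:Int)^64) := by
  have hlen : (Tlist m).length = 64 := by simp only [Tlist, List.length_ofFn]
  unfold BitsToSInt
  simp only [hlen, Tlist_getD m 0 (by norm_num)]
  rw [PySem.List.foldl_congr_mem
      (g := fun (num : Int) (i : Nat) => num + bitI m (i-1) * (2:Int)^(i-1)) _ _ _
      (by
        intro acc i hi
        have hi' : 1 ≤ i ∧ i < 64 := by
          have := List.mem_range'.mp hi
          omega
        rw [Tlist_getD m (64 - i) (by omega), show 63 - (64 - i) = i - 1 from by omega]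
        rcases bitI_zero_or_one m (i-1) with h | h <;> simp [h])]
  rw [PySem.List.foldl_add, List.range'_eq_map_range, List.map_map]
  have hmapeq : ((fun i => bitI m (i-1) * (2:Int)^(i-1)) ∘ (fun x => 1 + x))
      = fun k => bitI m k * (2:Int)^k := by
    funext k
    simp only [Function.comp_apply, show 1 + k - 1 = k from by omega]
  rw [hmapeq, sum_bits]
  have hs := step_identity m 63
  have h0 : (0:Int) ≤ m % 2^63 := Int.emod_nonneg m (by positivity)
  have h1 : m % (2:Int)^63 < 2^63 := Int.emod_lt_of_pos m (by positivity)
  have hp : ((2:Int)^64) = 2 * 2^63 := by norm_num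
  rcases bitI_zero_or_one m 63 with h | h <;> rw [h] <;> rw [h] at hs <;>
    split_ifs with hc <;> omega

lemma ans_inv (s : Int) (l1 : List Int) : ∀ (n : Nat), n ≤ 64 →
    ((List.range n).foldl
        (fun (ans : List Int) (i : Nat) => if 0 ≤ (i:Int) - s ∧ (i:Int) - s ≤ 63 then
            ans.set ((i:Int) - s).toNat (l1.getD i 0) else ans)
        (List.replicate 64 (0:Int))).length = 64 ∧
    (∀ j, j < 64 → ((List.range n).foldl
        (fun (ans : List Int) (i : Nat) => if 0 ≤ (i:Int) - s ∧ (i:Int) - s ≤ 63 then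
            ans.set ((i:Int) - s).toNat (l1.getD i 0) else ans)
        (List.replicate 64 (0:Int))).getD j 0 =
        if 0 ≤ (j:Int) + s ∧ (j:Int) + s < (n:Int) then l1.getD ((j:Int) + s).toNat 0 else 0) := by
  intro n
  induction n with
  | zero =>
    intro _
    refine ⟨by simp, ?_⟩
    intro j hj
    rw [List.getD_eq_getElem _ 0 (by simp; omega)]
    simp only [List.range_zero, List.foldl_nil, List.getElem_replicate]
    split_ifs with h
    · omega
    · rfl
  | succ n ih =>
    intro hn
    obtain ⟨hL, hI⟩ := ih (by omega)
    rw [List.range_succ, List.foldl_append, List.foldl_cons, List.foldl_nil]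
    set A := (List.range n).foldl _ (List.replicate 64 (0:Int)) with hA
    by_cases hc : 0 ≤ (n:Int) - s ∧ (n:Int) - s ≤ 63
    · rw [if_pos hc]
      refine ⟨by simp [hL], ?_⟩
      intro j hj
      rw [List.getD_eq_getElem _ 0 (by simp [hL]; omega), List.getElem_set]
      by_cases hje : ((n:Int) - s).toNat = j
      · rw [if_pos hje]
        have hji : (j:Int) = (n:Int) - s := by omega
        rw [if_pos (by omega), show ((j:Int) + s).toNat = n from by omega]
      · rw [if_neg hje]
        have := hI j hj
        rw [List.getD_eq_getElem _ 0 (by omega)] at this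
        rw [this]
        have hne : (j:Int) + s ≠ (n:Int) := by omega
        split_ifs with h1 h2 h2
        · rfl
        · omega
        · omega
        · rfl
    · rw [if_neg hc]
      refine ⟨hL, ?_⟩
      intro j hj
      rw [hI j hj]
      have hne : (j:Int) + s ≠ (n:Int) := by omega
      split_ifs with h1 h2 h2
      · rfl
      · omega
      · omega
      · rfl

-- ===== VERDICT (by name: the statement is the Claim_ definition above) =====
theorem SHL_spec : Claim_equal_SHL := by
  unfold Claim_equal_SHL
  intro input1 input2 hdom
  unfold Spec_SHL SHL SHL_alt
  have hdom' : -2147483648 ≤ input1 ∧ input1 ≤ 2147483648 ∧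
      -2147483648 ≤ input2 ∧ input2 ≤ 2147483648 := by
    simp only [Dom_SHL, pvDomInt, Bool.and_eq_true, decide_eq_true_eq] at hdom
    tauto
  by_cases h64 : input2.natAbs ≥ 64
  · rw [if_pos h64, if_pos h64]
  · rw [if_neg h64, if_neg h64]
    have hs63 : -63 ≤ input2 ∧ input2 ≤ 63 := by omega
    have hrange : ¬ (input1 < -((2:Int)^63) ∨ input1 > (2:Int)^63 - 1) := by
      rw [not_or]
      norm_num
      omega
    have hS : SIntToBits input1 64 = some (Tlist input1) := by
      unfold SIntToBits
      rw [if_neg (by norm_num; omega), intToBits_eq]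
    rw [hS, if_neg hrange]
    dsimp only
    set u := input1 % (2:Int)^64 with hu
    have hu0 : (0:Int) ≤ u := Int.emod_nonneg input1 (by positivity)
    have hult : u < (2:Int)^64 := Int.emod_lt_of_pos input1 (by positivity)
    obtain ⟨haL, haI⟩ := ans_inv input2 (Tlist input1) 64 (le_refl _)
    by_cases hsgn : input2 ≥ 0
    · rw [if_pos hsgn]
      set r := (u * (2:Int)^input2.toNat) % (2:Int)^64 with hr
      have hr0 : (0:Int) ≤ r := Int.emod_nonneg _ (by positivity)
      have hrlt : r < (2:Int)^64 := Int.emod_lt_of_pos _ (by positivity)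
      have hsN : ((input2.toNat : Nat) : Int) = input2 := Int.toNat_of_nonneg hsgn
      have hans : (List.range 64).foldl
          (fun (ans : List Int) (i : Nat) => if 0 ≤ (i:Int) - input2 ∧ (i:Int) - input2 ≤ 63 then
            ans.set ((i:Int) - input2).toNat ((Tlist input1).getD i 0) else ans)
          (List.replicate 64 (0:Int)) = Tlist r := by
        apply List.ext_getElem (by rw [haL]; simp only [Tlist, List.length_ofFn])
        intro j h1 h2
        have hj : j < 64 := by omega
        rw [← List.getD_eq_getElem _ 0 h1, ← List.getD_eq_getElem _ 0 h2, haI j hj,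
            Tlist_getD r j hj, hr,
            bitI_of_mul_emod u hu0 input2.toNat (63 - j) (by omega)]
        by_cases hc : input2.toNat ≤ 63 - j
        · rw [if_pos hc, if_pos (by omega)]
          rw [Tlist_getD input1 ((j:Int) + input2).toNat (by omega)]
          rw [show (63 : Nat) - ((j:Int) + input2).toNat = 63 - j - input2.toNat from by omega]
          rw [hu, bitI_emod input1 (63 - j - input2.toNat) 64 (by omega)]
        · rw [if_neg hc, if_neg (by omega)]
      rw [hans, bitsToSInt_Tlist r, Int.emod_emod_of_dvd _ (dvd_refl _)]
    · rw [if_neg hsgn]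
      set k := (-input2).toNat with hkdef
      have hk : ((k : Nat) : Int) = -input2 := Int.toNat_of_nonneg (by omega)
      set r := u / (2:Int)^k with hr
      have hr0 : (0:Int) ≤ r := Int.ediv_nonneg hu0 (by positivity)
      have hrlt : r < (2:Int)^64 := lt_of_le_of_lt (Int.ediv_le_self _ hu0) hult
      have hans : (List.range 64).foldl
          (fun (ans : List Int) (i : Nat) => if 0 ≤ (i:Int) - input2 ∧ (i:Int) - input2 ≤ 63 then
            ans.set ((i:Int) - input2).toNat ((Tlist input1).getD i 0) else ans)
          (List.replicate 64 (0:Int)) = Tlist r := by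
        apply List.ext_getElem (by rw [haL]; simp only [Tlist, List.length_ofFn])
        intro j h1 h2
        have hj : j < 64 := by omega
        rw [← List.getD_eq_getElem _ 0 h1, ← List.getD_eq_getElem _ 0 h2, haI j hj,
            Tlist_getD r j hj, hr, bitI_of_div u hu0 k (63 - j)]
        by_cases hc : k ≤ j
        · rw [if_pos (by omega)]
          rw [Tlist_getD input1 ((j:Int) + input2).toNat (by omega)]
          rw [show (63 : Nat) - ((j:Int) + input2).toNat = 63 - j + k from by omega]
          rw [hu, bitI_emod input1 (63 - j + k) 64 (by omega)]
        · rw [if_neg (by omega)]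
          refine (bitI_eq_zero_of_lt u (63 - j + k) hu0 ?_).symm
          refine lt_of_lt_of_le hult (pow_le_pow_right₀ (by norm_num) (by omega))
      rw [hans, bitsToSInt_Tlist r,
          Int.emod_eq_of_lt hr0 hrlt]
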